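-- pv_equiv track=rewrite | github.com/paiml/depyler | examples/hard_ternary_heap.py | ternary_sift_up
-- ===== SOURCE A (Python) =====
-- def ternary_parent(i: int) -> int:
--     """Return parent index in ternary heap."""
--     if i == 0:
--         return 0
--     result: int = (i - 1) // 3
--     return result
--
-- def ternary_sift_up(heap: list[int], idx: int) -> int:
--     """Sift up in ternary heap. Returns final position."""
--     pos: int = idx
--     while pos > 0:
--         par: int = ternary_parent(pos)
--         if heap[pos] < heap[par]:
--             tmp: int = heap[pos]
--             heap[pos] = heap[par]
--             heap[par] = tmp
--             pos = par
--         else: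
--             return pos
--     return pos
-- ===== SOURCE B (Python) =====
-- def ternary_sift_up(heap: list[int], idx: int) -> int:
--     """Sift up in ternary heap via a moving hole. Returns final position."""
--     pos = idx
--     if pos <= 0:
--         return pos
--     val = heap[pos]
--     while pos > 0:
--         par = (pos - 1) // 3
--         if val < heap[par]:
--             heap[pos] = heap[par]
--             pos = par
--         else:
--             break
--     heap[pos] = val
--     return pos
-- ===== Notes on version B (the rewrite author's own statement) =====
-- stated objective: simpler
-- what changed: Replaces the three-assignment swap per level with a cached value and a moving hole: parents shift down one assignment each and the value is written once at the end.
import Mathlib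
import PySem

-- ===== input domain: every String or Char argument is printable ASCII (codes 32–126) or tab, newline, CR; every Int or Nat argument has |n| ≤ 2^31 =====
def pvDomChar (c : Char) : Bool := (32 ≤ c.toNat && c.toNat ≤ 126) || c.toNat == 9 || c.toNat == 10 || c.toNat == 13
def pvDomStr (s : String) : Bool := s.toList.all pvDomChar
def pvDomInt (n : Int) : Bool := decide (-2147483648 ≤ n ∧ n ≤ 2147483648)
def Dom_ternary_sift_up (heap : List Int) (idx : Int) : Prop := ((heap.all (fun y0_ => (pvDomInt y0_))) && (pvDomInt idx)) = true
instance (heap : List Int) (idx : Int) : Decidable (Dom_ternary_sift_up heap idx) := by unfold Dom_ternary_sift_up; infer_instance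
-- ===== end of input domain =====

-- B replaces A's three-assignment swap per level by a cached value and a moving hole
-- (one write per level, one final write); equivalence proved for the RETURN value only —
-- both Pythons mutate `heap` in place and leave it in the same final state.

-- ===== PORT A =====
def ternary_parent (i : Int) : Int :=
  if i = 0 then 0 else PySem.Int.floordiv (i - 1) 3

-- termination fact for both loops (cited by decreasing_by)
theorem pv_parent_lt (pos : Int) (h : 0 < pos) :
    0 ≤ PySem.Int.floordiv (pos - 1) 3 ∧ PySem.Int.floordiv (pos - 1) 3 < pos := by
  rw [PySem.Int.floordiv_eq_ediv_of_pos (by omega)]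
  omega

-- A's while-loop: swap heap[pos] and heap[par] while the child is smaller
def siftA (heap : List Int) (pos : Int) : Int :=
  if h : 0 < pos then
    match PySem.List.pyGet? heap pos, PySem.List.pyGet? heap (ternary_parent pos) with
    | some hp, some hpar =>
        if hp < hpar then
          siftA (PySem.List.pySetD (PySem.List.pySetD heap pos hpar) (ternary_parent pos) hp)
                (ternary_parent pos)
        else pos
    | _, _ => pos   -- Python raises IndexError here; excluded by Pre_
  else pos
termination_by pos.toNat
decreasing_by
  have h1 := pv_parent_lt pos h
  unfold ternary_parent; rw [if_neg (by omega : ¬ pos = 0)]; omega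

def ternary_sift_up (heap : List Int) (idx : Int) : Int := siftA heap idx

-- ===== PORT B =====
-- B's while-loop: move parents down into the hole; only heap[par] is read
def siftB (heap : List Int) (val : Int) (pos : Int) : Int :=
  if h : 0 < pos then
    match PySem.List.pyGet? heap (PySem.Int.floordiv (pos - 1) 3) with
    | some hpar =>
        if val < hpar then
          siftB (PySem.List.pySetD heap pos hpar) val (PySem.Int.floordiv (pos - 1) 3)
        else pos
    | none => pos   -- Python raises IndexError here; excluded by Pre_
  else pos
termination_by pos.toNat
decreasing_by
  have h1 := pv_parent_lt pos h; omega

-- Source B's final write heap[pos] = val only mutates the array, not the returned position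
def ternary_sift_up_alt (heap : List Int) (idx : Int) : Int :=
  if idx ≤ 0 then idx
  else
    match PySem.List.pyGet? heap idx with
    | some val => siftB heap val idx
    | none => idx   -- Python raises IndexError here; excluded by Pre_

-- ===== PRECONDITION & SPEC =====
-- A (and B) raise IndexError exactly when 0 < idx and idx ≥ len(heap); those inputs are excluded.
def Pre_ternary_sift_up (heap : List Int) (idx : Int) : Prop :=
  0 < idx → idx < (heap.length : Int)
instance (heap : List Int) (idx : Int) : Decidable (Pre_ternary_sift_up heap idx) := by
  unfold Pre_ternary_sift_up; infer_instance

def pvWitness_ternary_sift_up : List Int × Int := ([5, 8, 9, 1], 3)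

def Spec_ternary_sift_up (heap : List Int) (idx : Int) (out : Int) : Prop := out = ternary_sift_up_alt heap idx
instance (heap : List Int) (idx : Int) (out : Int) : Decidable (Spec_ternary_sift_up heap idx out) := by unfold Spec_ternary_sift_up; infer_instance

-- ===== CLAIM (what is proved, stated in full; the proofs are below) =====
def Claim_equal_ternary_sift_up : Prop := ∀ (heap : List Int) (idx : Int), Dom_ternary_sift_up heap idx → Pre_ternary_sift_up heap idx → Spec_ternary_sift_up heap idx (ternary_sift_up heap idx)

-- ===== LEMMAS AND PROOFS =====

-- Invariant: A's and B's heaps agree strictly below pos, and A's heap holds the sifted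
-- value val at pos; then the two loops return the same final position.
theorem sift_agree : ∀ (n : Nat) (heapA heapB : List Int) (val pos : Int),
    pos.toNat ≤ n →
    0 ≤ pos → pos < (heapA.length : Int) → heapA.length = heapB.length →
    PySem.List.pyGet? heapA pos = some val →
    (∀ i : Int, 0 ≤ i → i < pos → PySem.List.pyGet? heapA i = PySem.List.pyGet? heapB i) →
    siftA heapA pos = siftB heapB val pos := by
  intro n
  induction n with
  | zero =>
      intro heapA heapB val pos hn h0 _ _ _ _
      have hz : pos = 0 := by omega
      rw [siftA, siftB, dif_neg (by omega), dif_neg (by omega)]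
  | succ n ih =>
      intro heapA heapB val pos hn h0 hlen hBlen hval hag
      by_cases hp : 0 < pos
      · have hpar := pv_parent_lt pos hp
        set par := PySem.Int.floordiv (pos - 1) 3 with hpardef
        have hparA : par < (heapA.length : Int) := by omega
        have hgA : PySem.List.pyGet? heapA par = some heapA[par.toNat] :=
          PySem.List.pyGet?_eq_some_getElem heapA (by omega) (by exact_mod_cast hparA)
        have hgB : PySem.List.pyGet? heapB par = some heapA[par.toNat] := by
          rw [← hag par (by omega) (by omega)]; exact hgA
        have htp : ternary_parent pos = par := by
          unfold ternary_parent; rw [if_neg (by omega)]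
        rw [siftA, siftB, dif_pos hp, dif_pos hp, htp, hval, hgA, hgB]
        simp only []
        by_cases hlt : val < heapA[par.toNat]
        · rw [if_pos hlt, if_pos hlt]
          apply ih
          · have : par.toNat < pos.toNat := by omega
            omega
          · omega
          · rw [PySem.List.length_pySetD, PySem.List.length_pySetD]; omega
          · rw [PySem.List.length_pySetD, PySem.List.length_pySetD,
                PySem.List.length_pySetD]; omega
          · rw [PySem.List.pySetD_of_nonneg _ _ (by omega),
                PySem.List.pySetD_of_nonneg _ _ (by omega),
                PySem.List.pyGet?_of_nonneg _ (by omega)]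
            rw [List.getElem?_set_self (by simp; omega)]
          · intro i hi0 hipar
            have hi_ne_pos : i.toNat ≠ pos.toNat := by omega
            have hi_ne_par : i.toNat ≠ par.toNat := by omega
            rw [PySem.List.pySetD_of_nonneg _ _ (by omega),
                PySem.List.pySetD_of_nonneg _ _ (by omega),
                PySem.List.pySetD_of_nonneg _ _ (by omega),
                PySem.List.pyGet?_of_nonneg _ (by omega),
                PySem.List.pyGet?_of_nonneg _ (by omega),
                List.getElem?_set_ne (by omega), List.getElem?_set_ne (by omega),
                List.getElem?_set_ne (by omega)]
            have := hag i hi0 (by omega)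
            rwa [PySem.List.pyGet?_of_nonneg _ (by omega),
                 PySem.List.pyGet?_of_nonneg _ (by omega)] at this
        · rw [if_neg hlt, if_neg hlt]
      · rw [siftA, siftB, dif_neg hp, dif_neg hp]

-- ===== VERDICT (by name: the statement is the Claim_ definition above) =====
theorem ternary_sift_up_spec : Claim_equal_ternary_sift_up := by
  intro heap idx _ hpre
  unfold Spec_ternary_sift_up ternary_sift_up ternary_sift_up_alt
  by_cases h0 : idx ≤ 0
  · rw [if_pos h0, siftA, dif_neg (by omega)]
  · have hp : 0 < idx := by omega
    have hlen : idx < (heap.length : Int) := hpre hp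
    have hget : PySem.List.pyGet? heap idx = some heap[idx.toNat] :=
      PySem.List.pyGet?_eq_some_getElem heap (by omega) (by exact_mod_cast hlen)
    rw [if_neg h0, hget]
    exact sift_agree idx.toNat heap heap _ idx (le_refl _) (by omega) hlen rfl hget
      (fun i _ _ => rfl)
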